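-- pv_equiv track=rewrite | github.com/omairqazi29/grokforge | apps/api/app/services/dependency_scanner.py | get_affected_files
-- ===== SOURCE A (Python) =====
-- from typing import Dict, List, Optional, Set
--
-- def get_affected_files(
--     graph: Dict[str, List[str]], changed_files: List[str]
-- ) -> List[str]:
--     """Given changed files, find all files that depend on them (reverse deps)."""
--     reverse: Dict[str, Set[str]] = {}
--     for file, deps in graph.items():
--         for dep in deps:
--             reverse.setdefault(dep, set()).add(file)
--
--     affected: Set[str] = set()
--     queue = list(changed_files)
--     while queue:
--         current = queue.pop(0)
--         for dependent in reverse.get(current, set()):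
--             if dependent not in affected and dependent not in changed_files:
--                 affected.add(dependent)
--                 queue.append(dependent)
--
--     return sorted(affected)
-- ===== SOURCE B (Python) =====
-- def get_affected_files(graph, changed_files):
--     """Given changed files, find all files that depend on them (reverse deps)."""
--     # Fixpoint of forward scans over the graph: no reverse index, no queue.
--     affected = set()
--     changed = True
--     while changed:
--         changed = False
--         for file, deps in graph.items():
--             if file in affected or file in changed_files:
--                 continue
--             if any(d in affected or d in changed_files for d in deps):
--                 affected.add(file)
--                 changed = True
--     return sorted(affected)
-- ===== Notes on version B (the rewrite author's own statement) =====
-- stated objective: alternative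
-- what changed: Replaces the reverse-dependency index plus BFS queue with repeated forward scans of the original graph to a fixpoint: a pass marks any unmarked, unchanged file one of whose own dependencies is already marked or changed, and passes repeat until nothing changes.
import Mathlib
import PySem

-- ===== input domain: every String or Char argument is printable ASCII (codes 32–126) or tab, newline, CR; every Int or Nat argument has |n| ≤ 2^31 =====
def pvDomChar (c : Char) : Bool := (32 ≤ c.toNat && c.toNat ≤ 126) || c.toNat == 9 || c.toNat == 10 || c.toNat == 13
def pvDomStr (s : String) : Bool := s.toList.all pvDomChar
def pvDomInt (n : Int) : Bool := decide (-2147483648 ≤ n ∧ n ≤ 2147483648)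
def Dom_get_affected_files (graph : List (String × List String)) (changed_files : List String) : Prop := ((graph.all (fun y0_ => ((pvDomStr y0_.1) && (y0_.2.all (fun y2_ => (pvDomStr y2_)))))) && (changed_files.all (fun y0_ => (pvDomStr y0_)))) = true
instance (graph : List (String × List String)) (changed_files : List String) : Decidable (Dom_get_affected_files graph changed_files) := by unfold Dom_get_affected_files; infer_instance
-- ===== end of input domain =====

-- B replaces A's reverse-dependency index and BFS queue with repeated forward scans of the
-- original graph to a fixpoint (objective: alternative algorithm of similar cost).

-- ===== PORT A =====
-- reverse.setdefault(dep, set()).add(file): store back the dep's set with file added.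
def pvBuildReverse (graph : List (String × List String)) : PySem.Dict String (PySem.Set String) :=
  graph.foldl
    (fun r p => p.2.foldl
      (fun r dep => r.insert dep (PySem.Set.add (r.getD dep PySem.Set.empty) p.1)) r)
    PySem.Dict.empty

-- body of 'for dependent in reverse.get(current, set())' (set iteration order does not affect
-- the final sorted result; we iterate the stored first-insertion order)
def pvStepA (changed_files : List String) (st : PySem.Set String × List String) (dependent : String) : PySem.Set String × List String :=
  if dependent ∉ st.1 ∧ dependent ∉ changed_files then
    (PySem.Set.add st.1 dependent, st.2 ++ [dependent])
  else st

-- 'while queue:' — fuel bounds the number of pops; the lemmas below show it is never exhausted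
def pvBfsA (reverse : PySem.Dict String (PySem.Set String)) (changed_files : List String) : Nat → PySem.Set String → List String → PySem.Set String
  | 0, affected, _ => affected
  | _ + 1, affected, [] => affected
  | fuel + 1, affected, current :: rest =>
    let st := (reverse.getD current PySem.Set.empty).foldl (pvStepA changed_files) (affected, rest)
    pvBfsA reverse changed_files fuel st.1 st.2

def get_affected_files (graph : List (String × List String)) (changed_files : List String) : List String :=
  PySem.List.sorted
    (pvBfsA (pvBuildReverse graph) changed_files (changed_files.length + graph.length + 1) PySem.Set.empty changed_files)
    (fun x => x) false

-- ===== PORT B =====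
-- loop body of one forward pass over graph.items(); the Bool is the 'changed' flag
def pvStepB (changed_files : List String) (st : PySem.Set String × Bool) (p : String × List String) : PySem.Set String × Bool :=
  if p.1 ∈ st.1 ∨ p.1 ∈ changed_files then st
  else if p.2.any (fun d => decide (d ∈ st.1 ∨ d ∈ changed_files)) then
    (PySem.Set.add st.1 p.1, true)
  else st

-- 'while changed:' — fuel bounds the number of passes; the lemmas below show it is never exhausted
def pvLoopB (graph : List (String × List String)) (changed_files : List String) : Nat → PySem.Set String → PySem.Set String
  | 0, affected => affected
  | fuel + 1, affected =>
    let st := graph.foldl (pvStepB changed_files) (affected, false)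
    if st.2 then pvLoopB graph changed_files fuel st.1 else st.1

def get_affected_files_alt (graph : List (String × List String)) (changed_files : List String) : List String :=
  PySem.List.sorted (pvLoopB graph changed_files (graph.length + 1) PySem.Set.empty) (fun x => x) false

-- ===== PRECONDITION & SPEC =====
def Spec_get_affected_files (graph : List (String × List String)) (changed_files : List String) (out : List String) : Prop := out = get_affected_files_alt graph changed_files
instance (graph : List (String × List String)) (changed_files : List String) (out : List String) : Decidable (Spec_get_affected_files graph changed_files out) := by unfold Spec_get_affected_files; infer_instance

-- ===== CLAIM (what is proved, stated in full; the proofs are below) =====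
def Claim_equal_get_affected_files : Prop := ∀ (graph : List (String × List String)) (changed_files : List String), Dom_get_affected_files graph changed_files → Spec_get_affected_files graph changed_files (get_affected_files graph changed_files)

-- ===== LEMMAS AND PROOFS =====

-- x transitively-depends-wise: x has a direct dependency d (forward edge x → d)
def pvEdge (graph : List (String × List String)) (x d : String) : Prop :=
  ∃ p ∈ graph, p.1 = x ∧ d ∈ p.2

-- a set closed under "file depends on a changed or already-collected file"
def pvClosed (graph : List (String × List String)) (changed_files : List String) (S : List String) : Prop :=
  ∀ p ∈ graph, p.1 ∉ changed_files → (∃ d ∈ p.2, d ∈ changed_files ∨ d ∈ S) → p.1 ∈ S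

lemma mem_revInner (file : String) (deps : List String) (r : PySem.Dict String (PySem.Set String)) (d x : String) :
    x ∈ (deps.foldl (fun r dep => r.insert dep (PySem.Set.add (r.getD dep PySem.Set.empty) file)) r).getD d PySem.Set.empty
    ↔ x ∈ r.getD d PySem.Set.empty ∨ (x = file ∧ d ∈ deps) := by
  induction deps generalizing r with
  | nil => simp
  | cons dep deps ih =>
    simp only [List.foldl_cons, ih]
    rw [PySem.Dict.getD_insert]
    by_cases hd : d = dep
    · subst hd
      simp [PySem.Set.mem_add]
      tauto
    · simp [hd]

lemma mem_buildReverse (graph : List (String × List String)) (d x : String) :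
    x ∈ (pvBuildReverse graph).getD d PySem.Set.empty ↔ pvEdge graph x d := by
  unfold pvBuildReverse pvEdge
  have main : ∀ (l : List (String × List String)) (r : PySem.Dict String (PySem.Set String)),
      x ∈ (l.foldl (fun r p => p.2.foldl
        (fun r dep => r.insert dep (PySem.Set.add (r.getD dep PySem.Set.empty) p.1)) r) r).getD d PySem.Set.empty
      ↔ x ∈ r.getD d PySem.Set.empty ∨ ∃ p ∈ l, p.1 = x ∧ d ∈ p.2 := by
    intro l
    induction l with
    | nil => simp
    | cons p l ih =>
      intro r
      simp only [List.foldl_cons, ih, mem_revInner]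
      constructor
      · rintro (⟨h | ⟨rfl, hd⟩⟩ | ⟨q, hq, h1, h2⟩)
        · exact Or.inl h
        · exact Or.inr ⟨p, List.mem_cons_self .., rfl, hd⟩
        · exact Or.inr ⟨q, List.mem_cons_of_mem _ hq, h1, h2⟩
      · rintro (h | ⟨q, hq, h1, h2⟩)
        · exact Or.inl (Or.inl h)
        · rcases List.mem_cons.mp hq with rfl | hq2
          · exact Or.inl (Or.inr ⟨h1.symm, h2⟩)
          · exact Or.inr ⟨q, hq2, h1, h2⟩
  simpa [PySem.Dict.getD_empty] using main graph PySem.Dict.empty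

-- ---- fold lemmas for A's inner neighbour loop ----
lemma foldA_mono_set (changed_files ns : List String) (st : PySem.Set String × List String) (x : String)
    (h : x ∈ st.1) : x ∈ (ns.foldl (pvStepA changed_files) st).1 := by
  induction ns generalizing st with
  | nil => simpa using h
  | cons n ns ih =>
    simp only [List.foldl_cons]
    apply ih
    unfold pvStepA
    split
    · simp only [PySem.Set.mem_add]
      exact Or.inl h
    · exact h

lemma foldA_mono_queue (changed_files ns : List String) (st : PySem.Set String × List String) (x : String)
    (h : x ∈ st.2) : x ∈ (ns.foldl (pvStepA changed_files) st).2 := by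
  induction ns generalizing st with
  | nil => simpa using h
  | cons n ns ih =>
    simp only [List.foldl_cons]
    apply ih
    unfold pvStepA
    split
    · exact List.mem_append_left _ h
    · exact h

lemma foldA_mem_set (changed_files ns : List String) (st : PySem.Set String × List String) (x : String)
    (h : x ∈ (ns.foldl (pvStepA changed_files) st).1) : x ∈ st.1 ∨ (x ∈ ns ∧ x ∉ changed_files) := by
  induction ns generalizing st with
  | nil => simp at h; exact Or.inl h
  | cons n ns ih =>
    simp only [List.foldl_cons] at h
    rcases ih _ h with h1 | h1
    · unfold pvStepA at h1
      split at h1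
      · rename_i hc
        simp only [PySem.Set.mem_add] at h1
        rcases h1 with h2 | h2
        · exact Or.inl h2
        · subst h2
          exact Or.inr ⟨List.mem_cons_self .., hc.2⟩
      · exact Or.inl h1
    · exact Or.inr ⟨List.mem_cons_of_mem _ h1.1, h1.2⟩

lemma foldA_new_in_queue (changed_files ns : List String) (st : PySem.Set String × List String) (x : String)
    (h : x ∈ (ns.foldl (pvStepA changed_files) st).1) : x ∈ st.1 ∨ x ∈ (ns.foldl (pvStepA changed_files) st).2 := by
  induction ns generalizing st with
  | nil => simp at h ⊢; exact Or.inl h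
  | cons n ns ih =>
    simp only [List.foldl_cons] at h ⊢
    rcases ih _ h with h1 | h1
    · unfold pvStepA at h1
      split at h1
      · rename_i hc
        simp only [PySem.Set.mem_add] at h1
        rcases h1 with h2 | h2
        · exact Or.inl h2
        · subst h2
          refine Or.inr (foldA_mono_queue _ _ _ _ ?_)

          unfold pvStepA
          rw [if_pos hc]
          exact List.mem_append_right _ (List.mem_singleton.mpr rfl)
      · exact Or.inl h1
    · exact Or.inr h1

lemma foldA_queue_mem (changed_files ns : List String) (st : PySem.Set String × List String) (x : String)
    (h : x ∈ (ns.foldl (pvStepA changed_files) st).2) : x ∈ st.2 ∨ x ∈ (ns.foldl (pvStepA changed_files) st).1 := by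
  induction ns generalizing st with
  | nil => simp at h ⊢; exact Or.inl h
  | cons n ns ih =>
    simp only [List.foldl_cons] at h ⊢
    rcases ih _ h with h1 | h1
    · unfold pvStepA at h1
      split at h1
      · rename_i hc
        rcases List.mem_append.mp h1 with h2 | h2
        · exact Or.inl h2
        · have h3 : x = n := List.mem_singleton.mp h2
          subst h3
          refine Or.inr (foldA_mono_set _ _ _ _ ?_)
          unfold pvStepA
          rw [if_pos hc]
          simp [PySem.Set.mem_add]
      · exact Or.inl h1
    · exact Or.inr h1

lemma foldA_covers (changed_files ns : List String) (st : PySem.Set String × List String) (d : String)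
    (h : d ∈ ns) : d ∈ (ns.foldl (pvStepA changed_files) st).1 ∨ d ∈ changed_files := by
  induction ns generalizing st with
  | nil => simp at h
  | cons n ns ih =>
    simp only [List.foldl_cons]
    rcases List.mem_cons.mp h with rfl | h2
    · by_cases hc : d ∉ st.1 ∧ d ∉ changed_files
      · refine Or.inl (foldA_mono_set _ _ _ _ ?_)
        unfold pvStepA
        rw [if_pos hc]
        simp [PySem.Set.mem_add]
      · rw [not_and_or, not_not, not_not] at hc
        by_cases hd : d ∈ st.1
        · refine Or.inl (foldA_mono_set _ _ _ _ ?_)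
          unfold pvStepA
          split
          · simp only [PySem.Set.mem_add]; exact Or.inl hd
          · exact hd
        · exact Or.inr (hc.resolve_left hd)
    · exact ih _ h2

lemma foldA_nodup (changed_files ns : List String) (st : PySem.Set String × List String)
    (h : st.1.Nodup) : (ns.foldl (pvStepA changed_files) st).1.Nodup := by
  induction ns generalizing st with
  | nil => simpa using h
  | cons n ns ih =>
    simp only [List.foldl_cons]
    apply ih
    unfold pvStepA
    split
    · exact PySem.Set.nodup_add _ _ h
    · exact h

lemma foldA_measure (changed_files ns : List String) (st : PySem.Set String × List String) (U : List String)
    (hU : ∀ d ∈ ns, d ∈ U) :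
    (ns.foldl (pvStepA changed_files) st).2.length + (U.toFinset \ (ns.foldl (pvStepA changed_files) st).1.toFinset).card
      ≤ st.2.length + (U.toFinset \ st.1.toFinset).card := by
  induction ns generalizing st with
  | nil => simp
  | cons n ns ih =>
    simp only [List.foldl_cons]
    refine le_trans (ih _ (fun d hd => hU d (List.mem_cons_of_mem _ hd))) ?_
    unfold pvStepA
    split
    · rename_i hc
      have hadd : (PySem.Set.add st.1 n).toFinset = insert n st.1.toFinset := by
        rw [PySem.Set.add_of_not_mem hc.1]
        simp
      simp only [hadd, List.length_append, List.length_singleton]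
      rw [Finset.sdiff_insert]
      have hmem : n ∈ U.toFinset \ st.1.toFinset := by
        simp only [Finset.mem_sdiff, List.mem_toFinset]
        exact ⟨hU n (List.mem_cons_self ..), hc.1⟩
      rw [Finset.card_erase_of_mem hmem]
      have hpos : 0 < (U.toFinset \ st.1.toFinset).card := Finset.card_pos.mpr ⟨n, hmem⟩
      omega
    · exact le_rfl

-- ---- BFS lemmas ----
lemma bfsA_nodup (R : PySem.Dict String (PySem.Set String)) (changed_files : List String)
    (f : Nat) (a : PySem.Set String) (q : List String) (h : a.Nodup) :
    (pvBfsA R changed_files f a q).Nodup := by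
  induction f generalizing a q with
  | zero => simpa [pvBfsA] using h
  | succ f ih =>
    cases q with
    | nil => simpa [pvBfsA] using h
    | cons cur rest =>
      rw [pvBfsA]
      exact ih _ _ (foldA_nodup _ _ _ h)

lemma bfsA_sound (graph : List (String × List String)) (changed_files : List String)
    (F : List String) (hF : pvClosed graph changed_files F)
    (f : Nat) (a : PySem.Set String) (q : List String)
    (ha : ∀ x ∈ a, x ∈ F) (hq : ∀ x ∈ q, x ∈ changed_files ∨ x ∈ a) :
    ∀ x ∈ pvBfsA (pvBuildReverse graph) changed_files f a q, x ∈ F := by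
  induction f generalizing a q with
  | zero =>
    intro x hx
    rw [pvBfsA] at hx
    exact ha x hx
  | succ f ih =>
    cases q with
    | nil =>
      intro x hx
      rw [pvBfsA] at hx
      exact ha x hx
    | cons cur rest =>
      have hcur := hq cur (List.mem_cons_self ..)
      have hns : ∀ d ∈ (pvBuildReverse graph).getD cur PySem.Set.empty, d ∉ changed_files → d ∈ F := by
        intro d hd hdc
        obtain ⟨p, hp, hpd, hcp⟩ := (mem_buildReverse graph cur d).mp hd
        refine hpd ▸ hF p hp (by rw [hpd]; exact hdc) ⟨cur, hcp, ?_⟩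
        rcases hcur with h | h
        · exact Or.inl h
        · exact Or.inr (ha cur h)
      intro x hx
      rw [pvBfsA] at hx
      refine ih _ _ ?_ ?_ x hx
      · intro y hy
        rcases foldA_mem_set _ _ _ _ hy with h1 | h1
        · exact ha y h1
        · exact hns y h1.1 h1.2
      · intro y hy
        rcases foldA_queue_mem _ _ _ _ hy with h1 | h1
        · rcases hq y (List.mem_cons_of_mem _ h1) with h2 | h2
          · exact Or.inl h2
          · exact Or.inr (foldA_mono_set _ _ _ _ h2)
        · exact Or.inr h1

lemma bfsA_closed (graph : List (String × List String)) (changed_files : List String)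
    (f : Nat) (a : PySem.Set String) (q : List String)
    (hfuel : q.length + ((graph.map Prod.fst).toFinset \ a.toFinset).card < f)
    (hInv : ∀ x, (x ∈ changed_files ∨ x ∈ a) → x ∈ q ∨ ∀ p ∈ graph, x ∈ p.2 → p.1 ∈ changed_files ∨ p.1 ∈ a) :
    ∀ x, (x ∈ changed_files ∨ x ∈ pvBfsA (pvBuildReverse graph) changed_files f a q) →
      ∀ p ∈ graph, x ∈ p.2 → p.1 ∈ changed_files ∨ p.1 ∈ pvBfsA (pvBuildReverse graph) changed_files f a q := by
  induction f generalizing a q with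
  | zero => exact absurd hfuel (by omega)
  | succ f ih =>
    cases q with
    | nil =>
      intro x hx p hp hxp
      rw [pvBfsA] at hx ⊢
      rcases hInv x hx with h | h
      · exact absurd h (List.not_mem_nil)
      · exact h p hp hxp
    | cons cur rest =>
      have hkeys : ∀ d ∈ (pvBuildReverse graph).getD cur PySem.Set.empty, d ∈ graph.map Prod.fst := by
        intro d hd
        obtain ⟨p, hp, hpd, _⟩ := (mem_buildReverse graph cur d).mp hd
        exact hpd ▸ List.mem_map_of_mem hp
      have hm := foldA_measure changed_files ((pvBuildReverse graph).getD cur PySem.Set.empty) (a, rest) (graph.map Prod.fst) hkeys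
      have hfuel' : (((pvBuildReverse graph).getD cur PySem.Set.empty).foldl (pvStepA changed_files) (a, rest)).2.length
          + ((graph.map Prod.fst).toFinset \ (((pvBuildReverse graph).getD cur PySem.Set.empty).foldl (pvStepA changed_files) (a, rest)).1.toFinset).card < f := by
        simp only [List.length_cons] at hfuel
        simp only at hm
        omega
      have hInv' : ∀ x, (x ∈ changed_files ∨ x ∈ (((pvBuildReverse graph).getD cur PySem.Set.empty).foldl (pvStepA changed_files) (a, rest)).1) →
          x ∈ (((pvBuildReverse graph).getD cur PySem.Set.empty).foldl (pvStepA changed_files) (a, rest)).2 ∨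
            ∀ p ∈ graph, x ∈ p.2 → p.1 ∈ changed_files ∨ p.1 ∈ (((pvBuildReverse graph).getD cur PySem.Set.empty).foldl (pvStepA changed_files) (a, rest)).1 := by
        intro x hx
        by_cases hxa : x ∈ a
        · rcases hInv x (Or.inr hxa) with h | h
          · rcases List.mem_cons.mp h with rfl | h2
            · refine Or.inr ?_
              intro p hp hxp
              have hpns : p.1 ∈ (pvBuildReverse graph).getD x PySem.Set.empty :=
                (mem_buildReverse graph x p.1).mpr ⟨p, hp, rfl, hxp⟩
              rcases foldA_covers changed_files _ (a, rest) _ hpns with hc | hc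
              · exact Or.inr hc
              · exact Or.inl hc
            · exact Or.inl (foldA_mono_queue _ _ _ _ h2)
          · refine Or.inr ?_
            intro p hp hxp
            rcases h p hp hxp with h2 | h2
            · exact Or.inl h2
            · exact Or.inr (foldA_mono_set _ _ _ _ h2)
        · rcases hx with hxc | hxs
          · rcases hInv x (Or.inl hxc) with h | h
            · rcases List.mem_cons.mp h with rfl | h2
              · refine Or.inr ?_
                intro p hp hxp
                have hpns : p.1 ∈ (pvBuildReverse graph).getD x PySem.Set.empty :=
                  (mem_buildReverse graph x p.1).mpr ⟨p, hp, rfl, hxp⟩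
                rcases foldA_covers changed_files _ (a, rest) _ hpns with hc | hc
                · exact Or.inr hc
                · exact Or.inl hc
              · exact Or.inl (foldA_mono_queue _ _ _ _ h2)
            · refine Or.inr ?_
              intro p hp hxp
              rcases h p hp hxp with h2 | h2
              · exact Or.inl h2
              · exact Or.inr (foldA_mono_set _ _ _ _ h2)
          · rcases foldA_new_in_queue _ _ _ _ hxs with h | h
            · exact absurd h hxa
            · exact Or.inl h
      intro x hx p hp hxp
      rw [pvBfsA] at hx ⊢
      exact ih _ _ hfuel' hInv' x hx p hp hxp

-- ---- fold lemmas for B's pass ----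
lemma foldB_mono (changed_files : List String) (l : List (String × List String)) (st : PySem.Set String × Bool) (x : String)
    (h : x ∈ st.1) : x ∈ (l.foldl (pvStepB changed_files) st).1 := by
  induction l generalizing st with
  | nil => simpa using h
  | cons p l ih =>
    simp only [List.foldl_cons]
    apply ih
    unfold pvStepB
    split
    · exact h
    · split
      · simp only [PySem.Set.mem_add]
        exact Or.inl h
      · exact h

lemma foldB_flag_mono (changed_files : List String) (l : List (String × List String)) (st : PySem.Set String × Bool)
    (h : st.2 = true) : (l.foldl (pvStepB changed_files) st).2 = true := by
  induction l generalizing st with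
  | nil => simpa using h
  | cons p l ih =>
    simp only [List.foldl_cons]
    apply ih
    unfold pvStepB
    split
    · exact h
    · split
      · rfl
      · exact h

lemma foldB_mem (changed_files : List String) (l : List (String × List String)) (st : PySem.Set String × Bool) (x : String)
    (h : x ∈ (l.foldl (pvStepB changed_files) st).1) : x ∈ st.1 ∨ x ∈ l.map Prod.fst := by
  induction l generalizing st with
  | nil => simp at h; exact Or.inl h
  | cons p l ih =>
    simp only [List.foldl_cons] at h
    rcases ih _ h with h1 | h1
    · unfold pvStepB at h1
      split at h1
      · exact Or.inl h1
      · split at h1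
        · simp only [PySem.Set.mem_add] at h1
          rcases h1 with h2 | h2
          · exact Or.inl h2
          · subst h2
            exact Or.inr (List.mem_cons_self ..)
        · exact Or.inl h1
    · exact Or.inr (List.mem_cons_of_mem _ h1)

lemma foldB_nodup (changed_files : List String) (l : List (String × List String)) (st : PySem.Set String × Bool)
    (h : st.1.Nodup) : (l.foldl (pvStepB changed_files) st).1.Nodup := by
  induction l generalizing st with
  | nil => simpa using h
  | cons p l ih =>
    simp only [List.foldl_cons]
    apply ih
    unfold pvStepB
    split
    · exact h
    · split
      · exact PySem.Set.nodup_add _ _ h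
      · exact h

lemma foldB_false (changed_files : List String) (l : List (String × List String)) (st : PySem.Set String × Bool)
    (h : (l.foldl (pvStepB changed_files) st).2 = false) :
    (l.foldl (pvStepB changed_files) st).1 = st.1 ∧
      ∀ p ∈ l, p.1 ∉ changed_files → p.1 ∉ st.1 → ∀ d ∈ p.2, d ∉ st.1 ∧ d ∉ changed_files := by
  induction l generalizing st with
  | nil => exact ⟨rfl, by simp⟩
  | cons p l ih =>
    simp only [List.foldl_cons] at h ⊢
    by_cases hc1 : p.1 ∈ st.1 ∨ p.1 ∈ changed_files
    · have hstep : pvStepB changed_files st p = st := by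
        unfold pvStepB
        rw [if_pos hc1]
      rw [hstep] at h ⊢
      obtain ⟨h1, h2⟩ := ih _ h
      refine ⟨h1, ?_⟩
      intro q hq hqc hqs
      rcases List.mem_cons.mp hq with rfl | hq2
      · rcases hc1 with hc | hc
        · exact absurd hc hqs
        · exact absurd hc hqc
      · exact h2 q hq2 hqc hqs
    · by_cases hc2 : p.2.any (fun d => decide (d ∈ st.1 ∨ d ∈ changed_files)) = true
      · have hstep : (pvStepB changed_files st p).2 = true := by
          unfold pvStepB
          rw [if_neg hc1, if_pos hc2]
        have := foldB_flag_mono changed_files l _ hstep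
        rw [this] at h
        exact absurd h (by simp)
      · have hstep : pvStepB changed_files st p = st := by
          unfold pvStepB
          rw [if_neg hc1, if_neg hc2]
        rw [hstep] at h ⊢
        obtain ⟨h1, h2⟩ := ih _ h
        refine ⟨h1, ?_⟩
        intro q hq hqc hqs
        rcases List.mem_cons.mp hq with rfl | hq2
        · intro d hd
          have hc2' : ∀ d ∈ q.2, ¬(d ∈ st.1 ∨ d ∈ changed_files) := by
            simpa using hc2
          have := hc2' d hd
          exact ⟨fun hmem => this (Or.inl hmem), fun hmem => this (Or.inr hmem)⟩
        · exact h2 q hq2 hqc hqs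

lemma foldB_sound (graph : List (String × List String)) (changed_files : List String)
    (F : List String) (hF : pvClosed graph changed_files F)
    (l : List (String × List String)) (st : PySem.Set String × Bool)
    (hl : ∀ p ∈ l, p ∈ graph) (ha : ∀ x ∈ st.1, x ∈ F) :
    ∀ x ∈ (l.foldl (pvStepB changed_files) st).1, x ∈ F := by
  induction l generalizing st with
  | nil => simpa using ha
  | cons p l ih =>
    simp only [List.foldl_cons]
    refine ih _ (fun q hq => hl q (List.mem_cons_of_mem _ hq)) ?_
    intro x hx
    unfold pvStepB at hx
    split at hx
    · exact ha x hx
    · rename_i hc1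
      split at hx
      · rename_i hc2
        simp only [PySem.Set.mem_add] at hx
        rcases hx with h2 | h2
        · exact ha x h2
        · subst h2
          simp only [List.any_eq_true, decide_eq_true_eq] at hc2
          obtain ⟨d, hd, hdor⟩ := hc2
          refine hF p (hl p (List.mem_cons_self ..)) (fun hm => hc1 (Or.inr hm)) ⟨d, hd, ?_⟩
          rcases hdor with h3 | h3
          · exact Or.inr (ha d h3)
          · exact Or.inl h3
      · exact ha x hx

lemma foldB_progress (changed_files : List String) (l : List (String × List String)) (st : PySem.Set String × Bool)
    (h0 : st.2 = false) (h1 : (l.foldl (pvStepB changed_files) st).2 = true) :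
    ∃ x, x ∈ (l.foldl (pvStepB changed_files) st).1 ∧ x ∉ st.1 := by
  induction l generalizing st with
  | nil => rw [List.foldl_nil] at h1; exact absurd h1 (by simp [h0])
  | cons p l ih =>
    simp only [List.foldl_cons] at h1 ⊢
    by_cases hc1 : p.1 ∈ st.1 ∨ p.1 ∈ changed_files
    · have hstep : pvStepB changed_files st p = st := by
        unfold pvStepB
        rw [if_pos hc1]
      rw [hstep] at h1 ⊢
      exact ih _ h0 h1
    · by_cases hc2 : p.2.any (fun d => decide (d ∈ st.1 ∨ d ∈ changed_files)) = true
      · have hstep : pvStepB changed_files st p = (PySem.Set.add st.1 p.1, true) := by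
          unfold pvStepB
          rw [if_neg hc1, if_pos hc2]
        rw [hstep] at h1 ⊢
        refine ⟨p.1, foldB_mono _ _ _ _ ?_, fun hm => hc1 (Or.inl hm)⟩
        simp [PySem.Set.mem_add]
      · have hstep : pvStepB changed_files st p = st := by
          unfold pvStepB
          rw [if_neg hc1, if_neg hc2]
        rw [hstep] at h1 ⊢
        exact ih _ h0 h1

-- ---- loop lemmas for B ----
lemma loopB_nodup (graph : List (String × List String)) (changed_files : List String)
    (f : Nat) (a : PySem.Set String) (h : a.Nodup) :
    (pvLoopB graph changed_files f a).Nodup := by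
  induction f generalizing a with
  | zero => simpa [pvLoopB] using h
  | succ f ih =>
    rw [pvLoopB]
    split
    · exact ih _ (foldB_nodup _ _ _ h)
    · exact foldB_nodup _ _ _ h

lemma loopB_sound (graph : List (String × List String)) (changed_files : List String)
    (F : List String) (hF : pvClosed graph changed_files F)
    (f : Nat) (a : PySem.Set String) (ha : ∀ x ∈ a, x ∈ F) :
    ∀ x ∈ pvLoopB graph changed_files f a, x ∈ F := by
  induction f generalizing a with
  | zero =>
    intro x hx
    rw [pvLoopB] at hx
    exact ha x hx
  | succ f ih =>
    intro x hx
    rw [pvLoopB] at hx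
    split at hx
    · exact ih _ (foldB_sound graph changed_files F hF graph _ (fun q hq => hq) ha) x hx
    · exact foldB_sound graph changed_files F hF graph _ (fun q hq => hq) ha x hx

lemma loopB_closed (graph : List (String × List String)) (changed_files : List String)
    (f : Nat) (a : PySem.Set String)
    (hfuel : ((graph.map Prod.fst).toFinset \ a.toFinset).card < f) :
    pvClosed graph changed_files (pvLoopB graph changed_files f a) := by
  induction f generalizing a with
  | zero => exact absurd hfuel (by omega)
  | succ f ih =>
    by_cases hc : (graph.foldl (pvStepB changed_files) (a, false)).2 = true
    · obtain ⟨x, hx1, hx2⟩ := foldB_progress changed_files graph (a, false) rfl hc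
      have hx2' : x ∉ a := hx2
      have hxK : x ∈ graph.map Prod.fst := by
        rcases foldB_mem changed_files graph (a, false) x hx1 with h | h
        · exact absurd h hx2'
        · exact h
      have hss : (graph.map Prod.fst).toFinset \ (graph.foldl (pvStepB changed_files) (a, false)).1.toFinset
          ⊂ (graph.map Prod.fst).toFinset \ a.toFinset := by
        constructor
        · intro y hy
          simp only [Finset.mem_sdiff, List.mem_toFinset] at hy ⊢
          exact ⟨hy.1, fun hya => hy.2 (foldB_mono _ _ _ _ hya)⟩
        · intro hsub
          have hxin : x ∈ (graph.map Prod.fst).toFinset \ a.toFinset := by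
            simp only [Finset.mem_sdiff, List.mem_toFinset]
            exact ⟨hxK, hx2'⟩
          have := hsub hxin
          simp only [Finset.mem_sdiff, List.mem_toFinset] at this
          exact this.2 hx1
      have hcard := Finset.card_lt_card hss
      have hfuel' : ((graph.map Prod.fst).toFinset \ (graph.foldl (pvStepB changed_files) (a, false)).1.toFinset).card < f := by
        omega
      have heq : pvLoopB graph changed_files (f + 1) a
          = pvLoopB graph changed_files f (graph.foldl (pvStepB changed_files) (a, false)).1 := by
        rw [pvLoopB, if_pos hc]
      rw [heq]
      exact ih _ hfuel' 
    · have hc' : (graph.foldl (pvStepB changed_files) (a, false)).2 = false := by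
        simpa using hc
      obtain ⟨h1, h2⟩ := foldB_false changed_files graph (a, false) hc'
      have heq : pvLoopB graph changed_files (f + 1) a = a := by
        rw [pvLoopB, if_neg (by simp [hc'])]
        exact h1
      rw [heq]
      intro p hp hpc hex
      by_cases hpa : p.1 ∈ a
      · exact hpa
      · obtain ⟨d, hd, hdor⟩ := hex
        have hdp := h2 p hp hpc hpa d hd
        rcases hdor with h3 | h3
        · exact absurd h3 hdp.2
        · exact absurd h3 hdp.1

-- ---- assembly ----
lemma setA_eq_setB (graph : List (String × List String)) (changed_files : List String) :
    ∀ x, x ∈ pvBfsA (pvBuildReverse graph) changed_files (changed_files.length + graph.length + 1) PySem.Set.empty changed_files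
      ↔ x ∈ pvLoopB graph changed_files (graph.length + 1) PySem.Set.empty := by
  have hK : ((graph.map Prod.fst).toFinset).card ≤ graph.length := by
    calc ((graph.map Prod.fst).toFinset).card ≤ (graph.map Prod.fst).length := List.toFinset_card_le _
    _ = graph.length := List.length_map ..
  have hclosedB : pvClosed graph changed_files (pvLoopB graph changed_files (graph.length + 1) PySem.Set.empty) := by
    refine loopB_closed graph changed_files _ _ ?_
    simp only [PySem.Set.empty]
    simpa using Nat.lt_succ_of_le hK
  have hclosedA : pvClosed graph changed_files
      (pvBfsA (pvBuildReverse graph) changed_files (changed_files.length + graph.length + 1) PySem.Set.empty changed_files) := by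
    intro p hp hpc hex
    obtain ⟨d, hd, hdor⟩ := hex
    have hmain := bfsA_closed graph changed_files (changed_files.length + graph.length + 1) PySem.Set.empty changed_files
      (by simp only [PySem.Set.empty]; simp; omega)
      (fun x hx => Or.inl (hx.resolve_right (by simp [PySem.Set.empty])))
      d hdor p hp hd
    rcases hmain with h | h
    · exact absurd h hpc
    · exact h
  intro x
  constructor
  · intro hx
    refine bfsA_sound graph changed_files _ hclosedB _ PySem.Set.empty changed_files ?_ ?_ x hx
    · intro y hy
      exact absurd hy (by simp [PySem.Set.empty])
    · intro y hy
      exact Or.inl hy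
  · intro hx
    refine loopB_sound graph changed_files _ hclosedA _ PySem.Set.empty ?_ x hx
    intro y hy
    exact absurd hy (by simp [PySem.Set.empty])

-- ===== VERDICT (by name: the statement is the Claim_ definition above) =====
theorem get_affected_files_spec : Claim_equal_get_affected_files := by
  intro graph changed_files _
  unfold Spec_get_affected_files get_affected_files get_affected_files_alt
  apply PySem.List.sorted_eq_sorted_of_perm _ _ _ (fun a b h => h)
  refine (List.perm_ext_iff_of_nodup ?_ ?_).mpr (setA_eq_setB graph changed_files)
  · exact bfsA_nodup _ _ _ _ _ List.nodup_nil
  · exact loopB_nodup _ _ _ _ List.nodup_nil
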